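-- pv_equiv track=rewrite | github.com/sonos/torch-to-nnef | torch_to_nnef/torch_graph/ir_helpers.py | _reconstruct_view_dims
-- ===== SOURCE A (Python) =====
-- import typing as T
--
-- def _reconstruct_view_dims(
--     original_shape: T.Tuple[int, ...], wished_view: T.Tuple[int, ...]
-- ) -> T.Tuple[int, ...]:
--     """Reconstruct shapes of whished view
--
--     By example:
--         x_reshape = x.contiguous().view((-1,) + x.shape[2:])
--
--         Provide incomplete graph information about shapes filing info with None
--         as such:
--
--         view((-1, None, None))
--
--         but we know input by example:
--
--         (4, 64, 16, 128)
--
--         so we can solve real view dims to be: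
--
--         (-1, 16, 128)
--
--     """
--     assert len(original_shape) >= len(wished_view)
--     assert sum(_ == -1 for _ in wished_view) == 1, "impossible to guess ?"
--     completed_wished_view = list(wished_view)[:]
--
--     # try forward
--     for rank, dim_at_rank in enumerate(wished_view):
--         if dim_at_rank == -1:
--             # unable to guess further dimensions
--             break
--         completed_wished_view[rank] = original_shape[rank]
--
--     # try backward
--     for rank, dim_at_rank in enumerate(wished_view[::-1]):
--         if dim_at_rank == -1:
--             # unable to guess further dimensions
--             break
--         completed_wished_view[-rank - 1] = original_shape[-rank - 1]
--
--     assert len(wished_view) == len(completed_wished_view)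
--     assert None not in completed_wished_view
--     return tuple(completed_wished_view)
-- ===== SOURCE B (Python) =====
-- def _reconstruct_view_dims(original_shape, wished_view):
--     assert len(original_shape) >= len(wished_view)
--     assert sum(_ == -1 for _ in wished_view) == 1, "impossible to guess ?"
--     skip = len(original_shape) - len(wished_view)
--
--     def go(orig, wish):
--         # single simultaneous recursion over both sequences:
--         # copy pairwise; at the unique -1 emit -1 and skip the extra
--         # `skip` source dims, then keep copying pairwise.
--         if not wish:
--             return ()
--         if wish[0] == -1:
--             return (-1,) + go(orig[1 + skip:], wish[1:])
--         return (orig[0],) + go(orig[1:], wish[1:])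
--
--     return go(tuple(original_shape), tuple(wished_view))
-- ===== Notes on version B (the rewrite author's own statement) =====
-- stated objective: alternative
-- what changed: Replaces A's staged index-based passes (copy list, forward fill loop, backward fill loop over the reversed tuple with negative indices) by one recursive simultaneous traversal of both sequences that copies pairwise and, at the unique -1, emits -1 and skips the len difference of source dims.
import Mathlib
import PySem

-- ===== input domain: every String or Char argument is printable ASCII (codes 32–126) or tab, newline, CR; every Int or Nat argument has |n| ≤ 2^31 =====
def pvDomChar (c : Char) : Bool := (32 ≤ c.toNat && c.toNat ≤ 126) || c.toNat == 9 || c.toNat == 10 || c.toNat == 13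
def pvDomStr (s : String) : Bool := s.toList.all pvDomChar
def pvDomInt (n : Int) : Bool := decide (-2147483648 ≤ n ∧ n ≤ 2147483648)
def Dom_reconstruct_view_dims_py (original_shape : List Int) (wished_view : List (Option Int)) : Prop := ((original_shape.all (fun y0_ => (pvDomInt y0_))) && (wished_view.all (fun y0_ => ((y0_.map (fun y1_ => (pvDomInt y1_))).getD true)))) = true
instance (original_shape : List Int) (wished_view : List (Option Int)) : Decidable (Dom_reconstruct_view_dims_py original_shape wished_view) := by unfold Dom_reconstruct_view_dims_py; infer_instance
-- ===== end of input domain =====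

-- B replaces A's staged index-based filling loops by one recursive simultaneous traversal
-- of both sequences that skips the length difference at the unique -1 (objective: alternative).

-- ===== PORT A =====
-- forward loop: 'for rank, dim_at_rank in enumerate(wished_view): if dim_at_rank == -1: break;
-- completed[rank] = original_shape[rank]'.  Under Pre_ the read index 'rank' is always in range,
-- so 'orig.getD rank 0' is exact for 'original_shape[rank]' there (the default is never used).
def pvFwdA (orig : List Int) : List (Option Int) → Nat → List (Option Int) → List (Option Int)
  | [], _, completed => completed
  | d :: rest, rank, completed =>
    if d = some (-1) then completed
    else pvFwdA orig rest (rank + 1) (completed.set rank (some (orig.getD rank 0)))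

-- backward loop over wished_view[::-1]: Python's negative indices -rank-1 resolve to len-rank-1;
-- under Pre_ the loop breaks before rank reaches either length, so Nat subtraction is exact there.
def pvBwdA (orig : List Int) (n m : Nat) : List (Option Int) → Nat → List (Option Int) → List (Option Int)
  | [], _, completed => completed
  | d :: rest, rank, completed =>
    if d = some (-1) then completed
    else pvBwdA orig n m rest (rank + 1) (completed.set (m - rank - 1) (some (orig.getD (n - rank - 1) 0)))

def reconstruct_view_dims_py (original_shape : List Int) (wished_view : List (Option Int)) : List Int :=
  -- completed_wished_view = list(wished_view)[:]
  let completed := pvFwdA original_shape wished_view 0 wished_view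
  let completed := pvBwdA original_shape original_shape.length wished_view.length wished_view.reverse 0 completed
  -- 'assert None not in completed_wished_view' holds under Pre_, so the .getD 0 below never fires
  completed.map (fun o => o.getD 0)

-- ===== PORT B =====
-- go(orig, wish): copy pairwise; at the -1 emit -1 and drop 1+skip source dims.
-- 'orig[0]' raises IndexError only outside Pre_; under Pre_ the list is nonempty at every
-- read, so 'headD 0' is exact there; the slices orig[1+skip:]/orig[1:] are List.drop exactly.
def pvGoB (skip : Nat) : List (Option Int) → List Int → List Int
  | [], _ => []
  | w :: wish, orig =>
    if w = some (-1) then (-1) :: pvGoB skip wish (orig.drop (1 + skip))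
    else orig.headD 0 :: pvGoB skip wish (orig.drop 1)

def reconstruct_view_dims_py_alt (original_shape : List Int) (wished_view : List (Option Int)) : List Int :=
  let skip := original_shape.length - wished_view.length
  pvGoB skip wished_view original_shape

-- ===== PRECONDITION & SPEC =====
-- Pre_ = exactly A's two asserts: len(original_shape) >= len(wished_view) and exactly one -1 in wished_view.
def Pre_reconstruct_view_dims_py (original_shape : List Int) (wished_view : List (Option Int)) : Prop :=
  wished_view.length ≤ original_shape.length ∧ wished_view.count (some (-1)) = 1
instance (original_shape : List Int) (wished_view : List (Option Int)) : Decidable (Pre_reconstruct_view_dims_py original_shape wished_view) := by unfold Pre_reconstruct_view_dims_py; infer_instance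

def pvWitness_reconstruct_view_dims_py : List Int × List (Option Int) := ([4, 64, 16, 128], [some (-1), none, none])

def Spec_reconstruct_view_dims_py (original_shape : List Int) (wished_view : List (Option Int)) (out : List Int) : Prop := out = reconstruct_view_dims_py_alt original_shape wished_view
instance (original_shape : List Int) (wished_view : List (Option Int)) (out : List Int) : Decidable (Spec_reconstruct_view_dims_py original_shape wished_view out) := by unfold Spec_reconstruct_view_dims_py; infer_instance

-- ===== CLAIM (what is proved, stated in full; the proofs are below) =====
def Claim_equal_reconstruct_view_dims_py : Prop := ∀ (original_shape : List Int) (wished_view : List (Option Int)), Dom_reconstruct_view_dims_py original_shape wished_view → Pre_reconstruct_view_dims_py original_shape wished_view → Spec_reconstruct_view_dims_py original_shape wished_view (reconstruct_view_dims_py original_shape wished_view)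

-- ===== LEMMAS AND PROOFS =====

-- pvJ ws = index of the first 'some (-1)' in ws (= ws.length if absent): the number of loop steps
def pvJ : List (Option Int) → Nat
  | [] => 0
  | d :: rest => if d = some (-1) then 0 else pvJ rest + 1

lemma pvJ_append_not_mem (u v : List (Option Int)) (hu : some (-1) ∉ u) :
    pvJ (u ++ some (-1) :: v) = u.length := by
  induction u with
  | nil => simp [pvJ]
  | cons a u ih =>
    simp only [List.mem_cons, not_or] at hu
    have ha : a ≠ some (-1) := fun h => hu.1 h.symm
    simp [pvJ, ha, ih hu.2]

set_option maxRecDepth 4000 in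
lemma fwd_spec (orig : List Int) : ∀ (ws pre : List (Option Int)),
    pre.length + pvJ ws ≤ orig.length →
    pvFwdA orig ws pre.length (pre ++ ws) =
      pre ++ ((orig.drop pre.length).take (pvJ ws)).map some ++ ws.drop (pvJ ws) := by
  intro ws
  induction ws with
  | nil => intro pre _; simp [pvFwdA, pvJ]
  | cons d rest ih =>
    intro pre h
    by_cases hd : d = some (-1)
    · simp only [pvFwdA, if_pos hd, pvJ]
      simp
    · simp only [pvJ, hd, if_false] at h ⊢
      have hlt : pre.length < orig.length := by omega
      have hset : (pre ++ d :: rest).set pre.length (some (orig.getD pre.length 0))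
          = (pre ++ [some (orig.getD pre.length 0)]) ++ rest := by
        rw [List.set_append_right _ _ (le_refl _)]
        simp
      rw [pvFwdA, if_neg hd, hset]
      have hlen : pre.length + 1 = (pre ++ [some (orig.getD pre.length 0)]).length := by simp
      rw [hlen, ih]
      · have hdrop : orig.drop pre.length = orig[pre.length] :: orig.drop (pre.length + 1) :=
          List.drop_eq_getElem_cons hlt
        have hgd : orig.getD pre.length 0 = orig[pre.length] := List.getD_eq_getElem _ _ hlt
        have hL : (pre ++ [some (orig.getD pre.length 0)]).length = pre.length + 1 := by simp
        rw [hL, hdrop, List.take_succ_cons, List.drop_succ_cons, hgd]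
        simp only [List.map_cons, List.append_assoc, List.cons_append, List.nil_append]
      · simp; omega

lemma bwd_spec (orig : List Int) (n : Nat) (hn : n = orig.length) (m : Nat) :
    ∀ (ws2 front back : List (Option Int)),
    front.length + back.length = m →
    pvJ ws2 ≤ front.length →
    back.length + pvJ ws2 ≤ n →
    pvBwdA orig n m ws2 back.length (front ++ back) =
      front.take (front.length - pvJ ws2)
        ++ ((orig.drop (n - back.length - pvJ ws2)).take (pvJ ws2)).map some ++ back := by
  intro ws2
  induction ws2 with
  | nil => intro front back _ _ _; simp [pvBwdA, pvJ]
  | cons d rest ih =>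
    intro front back hm hjf hjn
    by_cases hd : d = some (-1)
    · simp [pvBwdA, pvJ, hd]
    · simp only [pvJ, hd, if_false] at hjf hjn ⊢
      have hfpos : 1 ≤ front.length := by omega
      have hidx : m - back.length - 1 = front.length - 1 := by omega
      have hrd : n - back.length - 1 < n := by omega
      have hgd : orig.getD (n - back.length - 1) 0 = orig[n - back.length - 1]'(hn ▸ hrd) :=
        List.getD_eq_getElem _ _ (hn ▸ hrd)
      set v : Option Int := some (orig.getD (n - back.length - 1) 0) with hv
      set front' : List (Option Int) := front.take (front.length - 1) with hf'
      have hset : (front ++ back).set (m - back.length - 1) v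
          = front' ++ (v :: back) := by
        rw [hidx, List.set_append_left _ _ (by omega)]
        rw [List.set_eq_take_append_cons_drop, if_pos (by omega),
            Nat.sub_add_cancel hfpos, List.drop_length]
        simp [hf']
      rw [pvBwdA, if_neg hd, hset]
      have hf'len : front'.length = front.length - 1 := by
        rw [hf', List.length_take]
        omega
      have hlen : back.length + 1 = (v :: back).length := by simp
      rw [hlen, ih front' (v :: back) (by simp [hf'len]; omega) (by simp [hf'len]; omega)
            (by simp; omega)]
      have e1 : front'.take (front'.length - pvJ rest)
          = front.take (front.length - (pvJ rest + 1)) := by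
        rw [hf', List.take_take, List.length_take]
        congr 1
        omega
      have e2 : n - (v :: back).length - pvJ rest = n - back.length - (pvJ rest + 1) := by
        simp; omega
      have e3 : (orig.drop (n - back.length - (pvJ rest + 1))).take (pvJ rest + 1)
          = (orig.drop (n - back.length - (pvJ rest + 1))).take (pvJ rest)
            ++ [orig[n - back.length - 1]'(hn ▸ hrd)] := by
        rw [List.take_add_one]
        congr 1
        have : (orig.drop (n - back.length - (pvJ rest + 1)))[pvJ rest]?
            = orig[n - back.length - (pvJ rest + 1) + pvJ rest]? := List.getElem?_drop ..
        rw [this]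
        have hix : n - back.length - (pvJ rest + 1) + pvJ rest = n - back.length - 1 := by omega
        rw [hix, List.getElem?_eq_getElem (hn ▸ hrd)]
        simp
      rw [e1, e2]
      have hsome : orig[n - back.length - 1]? = some (orig[n - back.length - 1]'(hn ▸ hrd)) :=
        List.getElem?_eq_getElem _
      simp [e3, hv, hsome, List.append_assoc]

lemma count_one_decomp (ws : List (Option Int)) (h : ws.count (some (-1)) = 1) :
    ∃ u v : List (Option Int),
      ws = u ++ some (-1) :: v ∧ some (-1) ∉ u ∧ some (-1) ∉ v := by
  have hmem : some (-1) ∈ ws := by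
    by_contra hc
    rw [List.count_eq_zero_of_not_mem hc] at h
    omega
  obtain ⟨u, v, rfl⟩ := List.append_of_mem hmem
  have hc := h
  rw [List.count_append, List.count_cons_self] at hc
  refine ⟨u, v, rfl, ?_, ?_⟩
  · exact fun hm => by have := List.one_le_count_iff.mpr hm; omega
  · exact fun hm => by have := List.one_le_count_iff.mpr hm; omega

-- B's copying phase: while no -1 is consumed, pvGoB emits head-by-head the prefix of orig
lemma goB_copy (skip : Nat) (u : List (Option Int)) (hu : some (-1) ∉ u) :
    ∀ (rest : List (Option Int)) (orig : List Int), u.length ≤ orig.length →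
    pvGoB skip (u ++ rest) orig = orig.take u.length ++ pvGoB skip rest (orig.drop u.length) := by
  induction u with
  | nil => intro rest orig _; simp
  | cons a u ih =>
    intro rest orig h
    simp only [List.mem_cons, not_or] at hu
    have ha : a ≠ some (-1) := fun hx => hu.1 hx.symm
    cases orig with
    | nil => simp at h
    | cons x xs =>
      simp only [List.cons_append, pvGoB, if_neg ha, List.headD_cons, List.drop_succ_cons,
        List.drop_zero]
      rw [ih hu.2 rest xs (by simpa using h)]
      simp

theorem equal_main (original_shape : List Int) (wished_view : List (Option Int))
    (hpre : Pre_reconstruct_view_dims_py original_shape wished_view) :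
    reconstruct_view_dims_py original_shape wished_view
      = reconstruct_view_dims_py_alt original_shape wished_view := by
  obtain ⟨hle, hcount⟩ := hpre
  obtain ⟨u, v, rfl, hu, hv⟩ := count_one_decomp wished_view hcount
  set k := u.length with hk
  have hm : (u ++ some (-1) :: v).length = k + 1 + v.length := by simp; omega
  have hmn : k + 1 + v.length ≤ original_shape.length := by
    rw [← hm]; exact hle
  have hJ : pvJ (u ++ some (-1) :: v) = k := pvJ_append_not_mem u v hu
  have hJr : pvJ (u ++ some (-1) :: v).reverse = v.length := by
    have hrw : (u ++ some (-1) :: v).reverse = v.reverse ++ some (-1) :: u.reverse := by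
      simp
    rw [hrw, pvJ_append_not_mem _ _ (by simpa using hv)]
    simp
  -- forward pass
  have hfwd : pvFwdA original_shape (u ++ some (-1) :: v) 0 (u ++ some (-1) :: v)
      = (original_shape.take k).map some ++ (some (-1) :: v) := by
    have h0 : ([] : List (Option Int)).length = 0 := rfl
    have := fwd_spec original_shape (u ++ some (-1) :: v) [] (by rw [h0, hJ]; omega)
    rw [h0, hJ] at this
    simpa [hk, List.drop_left] using this
  -- backward pass
  set front : List (Option Int) := (original_shape.take k).map some ++ (some (-1) :: v)
    with hfr
  have hfrontlen : front.length = k + 1 + v.length := by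
    simp [hfr, List.length_take]
    omega
  have hbwd := bwd_spec original_shape original_shape.length rfl ((u ++ some (-1) :: v).length)
      (u ++ some (-1) :: v).reverse front []
      (by rw [hfrontlen, hm]; rfl) (by rw [hJr, hfrontlen]; omega) (by rw [hJr]; simp; omega)
  rw [hJr] at hbwd
  have h00 : ([] : List (Option Int)).length = 0 := rfl
  rw [h00] at hbwd
  -- the prefix kept by the backward pass
  have htk : front.take (front.length - v.length) = (original_shape.take k).map some ++ [some (-1)] := by
    rw [hfrontlen]
    have hkk : k + 1 + v.length - v.length = k + 1 := by omega
    rw [hkk, hfr, List.take_append]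
    have hl1 : ((original_shape.take k).map some).length = k := by
      simp [List.length_take]; omega
    rw [hl1]
    have : k + 1 - k = 1 := by omega
    rw [List.take_of_length_le (by omega), this]
    rfl
  -- the tail segment is the whole drop
  have hseg : (original_shape.drop (original_shape.length - v.length)).take v.length
      = original_shape.drop (original_shape.length - v.length) := by
    apply List.take_of_length_le
    simp
    omega
  -- A's value
  have hbwd' : pvBwdA original_shape original_shape.length (u ++ some (-1) :: v).length
      (u ++ some (-1) :: v).reverse 0 front
      = ((original_shape.take k).map some ++ [some (-1)])
        ++ (original_shape.drop (original_shape.length - v.length)).map some := by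
    rw [List.append_nil] at hbwd
    rw [hbwd, htk, Nat.sub_zero, hseg]
    simp
  have hA : reconstruct_view_dims_py original_shape (u ++ some (-1) :: v)
      = original_shape.take k ++ [-1] ++ original_shape.drop (original_shape.length - v.length) := by
    unfold reconstruct_view_dims_py
    simp only [hfwd, hbwd']
    simp [List.map_append, List.append_assoc]
  -- B's value
  set skip := original_shape.length - (u ++ some (-1) :: v).length with hsk
  have hB : reconstruct_view_dims_py_alt original_shape (u ++ some (-1) :: v)
      = original_shape.take k ++ [-1] ++ original_shape.drop (original_shape.length - v.length) := by
    unfold reconstruct_view_dims_py_alt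
    rw [goB_copy skip u hu (some (-1) :: v) original_shape (by omega)]
    have hstep : pvGoB skip (some (-1) :: v) (original_shape.drop k)
        = (-1) :: pvGoB skip v ((original_shape.drop k).drop (1 + skip)) := by
      simp [pvGoB]
    have hdd : (original_shape.drop k).drop (1 + skip)
        = original_shape.drop (original_shape.length - v.length) := by
      rw [List.drop_drop]
      congr 1
      rw [hsk, hm]
      omega
    have hvcopy : pvGoB skip v (original_shape.drop (original_shape.length - v.length))
        = original_shape.drop (original_shape.length - v.length) := by
      have hlenv : v.length ≤ (original_shape.drop (original_shape.length - v.length)).length := by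
        simp; omega
      have := goB_copy skip v hv [] (original_shape.drop (original_shape.length - v.length)) hlenv
      rw [List.append_nil] at this
      have heq : (original_shape.drop (original_shape.length - v.length)).length = v.length := by
        simp; omega
      rw [this, hseg, List.drop_of_length_le heq.le]
      simp [pvGoB]
    rw [hstep, hdd, hvcopy, hk]
    simp
  rw [hA, hB]

-- ===== VERDICT (by name: the statement is the Claim_ definition above) =====
theorem reconstruct_view_dims_py_spec : Claim_equal_reconstruct_view_dims_py := by
  intro os wv _ hpre
  unfold Spec_reconstruct_view_dims_py
  exact equal_main os wv hpre
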